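-- pv_equiv track=rewrite | github.com/Apothor/Codecademy | Code Challenges/17. Egg Dropper/Egg Dropper.py | minEggDropperX
-- ===== SOURCE A (Python) =====
-- def minEggDropperX(x, y):
--     remaingingEggs = x
--     usedEggs = 0
--     remainingFloors = y
--     while (remainingFloors > 1 and remaingingEggs > 1):
--         remainingFloors -= remainingFloors // 2
--         remaingingEggs -= 1
--         usedEggs += 1
--     minDropsX = usedEggs
--     return usedEggs
-- ===== SOURCE B (Python) =====
-- def minEggDropperX(x, y):
--     if x <= 1 or y <= 1:
--         return 0
--     return min(x - 1, (y - 1).bit_length())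
-- ===== Notes on version B (the rewrite author's own statement) =====
-- stated objective: simpler
-- what changed: Replaces the floor-halving while-loop with a closed form: the halving count from y down to 1 is (y-1).bit_length(), capped by the egg budget x-1, with a single guard for degenerate inputs.
import Mathlib
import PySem

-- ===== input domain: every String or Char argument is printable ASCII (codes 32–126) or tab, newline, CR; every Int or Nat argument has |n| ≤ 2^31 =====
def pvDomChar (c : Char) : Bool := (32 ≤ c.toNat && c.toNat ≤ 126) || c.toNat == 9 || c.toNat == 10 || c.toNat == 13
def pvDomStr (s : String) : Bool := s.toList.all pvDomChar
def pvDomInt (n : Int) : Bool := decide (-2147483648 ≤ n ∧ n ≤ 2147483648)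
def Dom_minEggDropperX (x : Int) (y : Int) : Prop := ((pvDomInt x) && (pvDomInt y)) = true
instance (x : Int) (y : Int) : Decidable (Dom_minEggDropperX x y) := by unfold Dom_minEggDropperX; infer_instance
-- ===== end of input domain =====

-- B replaces A's floor-halving while-loop by the closed form min(x-1, (y-1).bit_length()) (simpler).


-- ===== PORT A =====
-- the while-loop of A, state = (remainingFloors, remaingingEggs, usedEggs);
-- the Nat fuel only guarantees totality (proved sufficient in minEggDropperX_loop_eq)
def minEggDropperX_loop : Nat → Int → Int → Int → Int
  | 0, _, _, used => used
  | fuel + 1, floors, eggs, used =>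
    if floors > 1 ∧ eggs > 1 then
      minEggDropperX_loop fuel (floors - PySem.Int.floordiv floors 2) (eggs - 1) (used + 1)
    else
      used

def minEggDropperX (x : Int) (y : Int) : Int :=
  minEggDropperX_loop (y.toNat + 1) y x 0

-- ===== PORT B =====
def minEggDropperX_alt (x : Int) (y : Int) : Int :=
  if x ≤ 1 ∨ y ≤ 1 then 0
  else min (x - 1) ((PySem.Int.bitLength (y - 1) : Int))

-- ===== PRECONDITION & SPEC =====
def Spec_minEggDropperX (x : Int) (y : Int) (out : Int) : Prop := out = minEggDropperX_alt x y
instance (x : Int) (y : Int) (out : Int) : Decidable (Spec_minEggDropperX x y out) := by unfold Spec_minEggDropperX; infer_instance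

-- ===== CLAIM (what is proved, stated in full; the proofs are below) =====
def Claim_equal_minEggDropperX : Prop := ∀ (x : Int) (y : Int), Dom_minEggDropperX x y → Spec_minEggDropperX x y (minEggDropperX x y)

-- ===== LEMMAS AND PROOFS =====

theorem minEggDropperX_loop_eq (fuel : Nat) (floors eggs used : Int)
    (hf : 1 ≤ floors) (hn : floors.toNat ≤ fuel) :
    minEggDropperX_loop fuel floors eggs used
      = used + min (max (eggs - 1) 0) ((PySem.Int.bitLength (floors - 1) : Int)) := by
  induction fuel generalizing floors eggs used with
  | zero => omega
  | succ n ih =>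
    rw [minEggDropperX_loop]
    split_ifs with h
    · -- floors ≥ 2, eggs ≥ 2
      have h2 : PySem.Int.floordiv floors 2 = floors / 2 :=
        PySem.Int.floordiv_eq_ediv_of_pos (by omega)
      rw [h2, ih (floors - floors / 2) (eggs - 1) (used + 1) (by omega) (by omega)]
      -- bitLength (floors-1) = bitLength ((floors-1)/2) + 1 and (floors - floors/2) - 1 = (floors-1)/2
      have hb : PySem.Int.bitLength (floors - 1)
          = PySem.Int.bitLength (PySem.Int.floordiv (floors - 1) 2) + 1 :=
        PySem.Int.bitLength_of_pos (by omega)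
      have h3 : PySem.Int.floordiv (floors - 1) 2 = (floors - 1) / 2 :=
        PySem.Int.floordiv_eq_ediv_of_pos (by omega)
      have h4 : floors - floors / 2 - 1 = (floors - 1) / 2 := by omega
      rw [h4, hb, h3]
      push_cast
      omega
    · -- loop exit: floors = 1 or eggs ≤ 1
      rcases not_and_or.mp h with h1 | h1
      · have : floors = 1 := by omega
        subst this
        simp [PySem.Int.bitLength_zero]
      · have hL : (0 : Int) ≤ (PySem.Int.bitLength (floors - 1) : Int) := by positivity
        omega

-- ===== VERDICT (by name: the statement is the Claim_ definition above) =====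
theorem minEggDropperX_spec : Claim_equal_minEggDropperX := by
  intro x y _
  unfold Spec_minEggDropperX minEggDropperX minEggDropperX_alt
  by_cases hy : y ≤ 1
  · rw [minEggDropperX_loop]
    simp only [show ¬(y > 1 ∧ x > 1) by omega, if_neg, not_false_iff]
    simp [hy]
  · push Not at hy
    rw [minEggDropperX_loop_eq (y.toNat + 1) y x 0 (by omega) (by omega)]
    by_cases hx : x ≤ 1
    · have hL : (0 : Int) ≤ (PySem.Int.bitLength (y - 1) : Int) := by positivity
      simp [hx]
    · have : ¬(x ≤ 1 ∨ y ≤ 1) := by omega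
      rw [if_neg this]
      have hL : (0 : Int) ≤ (PySem.Int.bitLength (y - 1) : Int) := by positivity
      simp [min_def, max_def]
      omega
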